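-- pv_equiv track=rewrite | github.com/eeshamoona/python-problems | primeSpiral.py | convertToPrimeArrangement
-- ===== SOURCE A (Python) =====
-- def convertToPrimeArrangement (a_list):
--     primeNumbersSeen = []
--     for i in range(len(a_list)):
--         isPrime = True
--         if (i+1 > 1):
--             for p_num in primeNumbersSeen:
--                 if (i+1) % p_num == 0:
--                     isPrime = False
--
--             if (isPrime):
--                 primeNumbersSeen.append(i+1)
--                 a_list[i] = "*"
--
--     return a_list
-- ===== SOURCE B (Python) =====
-- def convertToPrimeArrangement(a_list):
--     n = len(a_list)
--     is_comp = [False] * (n + 1)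
--     for d in range(2, n + 1):
--         for m in range(2 * d, n + 1, d):
--             is_comp[m] = True
--     for i in range(1, n):
--         if not is_comp[i + 1]:
--             a_list[i] = "*"
--     return a_list
-- ===== Notes on version B (the rewrite author's own statement) =====
-- stated objective: faster
-- what changed: B builds a sieve-style composite table once (marking every multiple m of every d in [2,n]) and then marks prime positions in one pass, instead of A's per-index trial division against the growing list of primes seen so far.
import Mathlib
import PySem

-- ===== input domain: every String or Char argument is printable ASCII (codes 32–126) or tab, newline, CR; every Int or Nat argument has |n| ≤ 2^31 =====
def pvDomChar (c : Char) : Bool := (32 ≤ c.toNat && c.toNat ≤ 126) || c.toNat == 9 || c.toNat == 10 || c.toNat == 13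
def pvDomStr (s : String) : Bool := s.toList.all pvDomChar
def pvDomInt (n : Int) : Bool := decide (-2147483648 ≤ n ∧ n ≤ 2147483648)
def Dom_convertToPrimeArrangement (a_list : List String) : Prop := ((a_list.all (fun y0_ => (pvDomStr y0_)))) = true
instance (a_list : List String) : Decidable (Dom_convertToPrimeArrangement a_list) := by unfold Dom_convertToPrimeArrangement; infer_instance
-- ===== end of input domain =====

-- B replaces A's per-index trial division by previously seen primes with a Sieve-of-Eratosthenes-style
-- composite table built once, for an asymptotically faster pass; A mutates a_list in place (B's Python
-- does the same mutation), the equivalence proved here is about the returned value.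

-- ===== PORT A =====
-- literal transliteration of A: fold over range(len(a_list)) carrying (primeNumbersSeen, a_list)
def convertToPrimeArrangement (a_list : List String) : List String :=
  ((PySem.List.pyRange 0 a_list.length 1).foldl
    (fun (st : List Int × List String) i =>
      -- isPrime = True; if (i+1 > 1):
      if i + 1 > 1 then
        -- for p_num in primeNumbersSeen: if (i+1) % p_num == 0: isPrime = False
        let isPrime := st.1.foldl (fun b p => if PySem.Int.mod (i + 1) p == 0 then false else b) true
        if isPrime then (st.1 ++ [i + 1], st.2.set i.toNat "*") else st
      else st)
    ([], a_list)).2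

-- ===== PORT B =====
-- is_comp = [False]*(n+1); for d in range(2,n+1): for m in range(2*d,n+1,d): is_comp[m] = True
def sieveB (n : Int) : List Bool :=
  (PySem.List.pyRange 2 (n + 1) 1).foldl
    (fun c d => (PySem.List.pyRange (2 * d) (n + 1) d).foldl (fun c m => c.set m.toNat true) c)
    (List.replicate (n + 1).toNat false)

-- literal transliteration of Source B (reads is_comp[i+1] via getD: the index is always in range there)
def convertToPrimeArrangement_alt (a_list : List String) : List String :=
  let n : Int := a_list.length
  let is_comp := sieveB n
  (PySem.List.pyRange 1 n 1).foldl
    (fun lst i => if !(is_comp.getD (i + 1).toNat false) then lst.set i.toNat "*" else lst)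
    a_list

-- ===== PRECONDITION & SPEC =====
def Spec_convertToPrimeArrangement (a_list : List String) (out : List String) : Prop := out = convertToPrimeArrangement_alt a_list
instance (a_list : List String) (out : List String) : Decidable (Spec_convertToPrimeArrangement a_list out) := by unfold Spec_convertToPrimeArrangement; infer_instance

-- ===== CLAIM (what is proved, stated in full; the proofs are below) =====
def Claim_equal_convertToPrimeArrangement : Prop := ∀ (a_list : List String), Dom_convertToPrimeArrangement a_list → Spec_convertToPrimeArrangement a_list (convertToPrimeArrangement a_list)

-- ===== LEMMAS AND PROOFS =====

-- common middleman: mark every index k with k+1 prime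
def applyMarks (n : Nat) (l : List String) : List String :=
  (List.range n).foldl (fun acc k => if Nat.Prime (k + 1) then acc.set k "*" else acc) l

-- number theory: m ≥ 2 is non-prime iff it has a divisor d with 2 ≤ d and 2*d ≤ m
theorem notPrime_iff_small_divisor (m : Nat) (hm : 2 ≤ m) :
    (¬ Nat.Prime m) ↔ ∃ d : Nat, 2 ≤ d ∧ 2 * d ≤ m ∧ d ∣ m := by
  constructor
  · intro h
    have h1 : m ≠ 1 := by omega
    have hq := Nat.minFac_prime h1
    have hd := Nat.minFac_dvd m
    refine ⟨m.minFac, hq.two_le, ?_, hd⟩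
    have hne : m.minFac ≠ m := fun e => h (e ▸ hq)
    obtain ⟨t, ht⟩ := hd
    have ht2 : 2 ≤ t := by
      rcases Nat.lt_or_ge t 2 with h2 | h2
      · interval_cases t <;> omega
      · exact h2
    calc 2 * m.minFac ≤ t * m.minFac := Nat.mul_le_mul_right _ ht2
      _ = m := by rw [Nat.mul_comm]; exact ht.symm
  · rintro ⟨d, hd2, hdm, hdvd⟩ hp
    have := (Nat.prime_def_lt.mp hp).2 d (by omega) hdvd
    omega

theorem prime_iff_no_lt_prime_dvd (n : Nat) (hn : 1 ≤ n) :
    Nat.Prime (n + 1) ↔ ¬ ∃ k : Nat, k < n ∧ Nat.Prime (k + 1) ∧ (k + 1) ∣ (n + 1) := by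
  constructor
  · rintro hp ⟨k, hk, hkp, hdvd⟩
    rcases (Nat.Prime.eq_one_or_self_of_dvd hp _ hdvd) with h | h
    · have := hkp.two_le; omega
    · omega
  · intro h
    by_contra hnp
    have h1 : (n + 1) ≠ 1 := by omega
    have hq := Nat.minFac_prime h1
    have hd := Nat.minFac_dvd (n + 1)
    have hne : (n+1).minFac ≠ n + 1 := fun e => hnp (e ▸ hq)
    have hle : (n+1).minFac ≤ n + 1 := Nat.le_of_dvd (by omega) hd
    have h2 : 2 ≤ (n+1).minFac := hq.two_le
    exact h ⟨(n+1).minFac - 1, by omega, by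
      have : (n+1).minFac - 1 + 1 = (n+1).minFac := by omega
      rw [this]; exact hq, by
      have : (n+1).minFac - 1 + 1 = (n+1).minFac := by omega
      rw [this]; exact hd⟩

-- A's loop invariant
theorem A_loop (n : Nat) (l : List String) :
    (PySem.List.pyRange 0 (n : Int) 1).foldl
      (fun (st : List Int × List String) i =>
        if i + 1 > 1 then
          let isPrime := st.1.foldl (fun b p => if PySem.Int.mod (i + 1) p == 0 then false else b) true
          if isPrime then (st.1 ++ [i + 1], st.2.set i.toNat "*") else st
        else st)
      ([], l)
    = (((List.range n).filter (fun k => decide (Nat.Prime (k + 1)))).map (fun k : Nat => ((k : Int) + 1)),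
       applyMarks n l) := by
  induction n with
  | zero => simp [applyMarks]
  | succ n ih =>
    have hc : ((n + 1 : Nat) : Int) = (n : Int) + 1 := by push_cast; ring
    rw [hc, PySem.List.pyRange_one_succ_right (by positivity), List.foldl_append, ih,
      List.foldl_cons, List.foldl_nil]
    rcases Nat.eq_zero_or_pos n with h0 | h1
    · subst h0
      rw [if_neg (by norm_num)]
      simp [applyMarks, List.range_succ, Nat.not_prime_one]
    · rw [if_pos (by omega : ((n : Int)) + 1 > 1)]
      have hiff : ((((List.range n).filter (fun k => decide (Nat.Prime (k + 1)))).map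
            (fun k : Nat => ((k : Int) + 1))).any (fun p => PySem.Int.mod ((n : Int) + 1) p == 0) = true)
          ↔ ∃ k : Nat, k < n ∧ Nat.Prime (k + 1) ∧ (k + 1) ∣ (n + 1) := by
        simp only [List.any_map, List.any_eq_true, List.mem_filter, List.mem_range,
          Function.comp, beq_iff_eq, PySem.Int.mod_eq_zero_iff_dvd, decide_eq_true_eq]

        constructor
        · rintro ⟨k, ⟨hk, hp⟩, hdvd⟩
          exact ⟨k, hk, hp, by exact_mod_cast hdvd⟩
        · rintro ⟨k, hk, hp, hdvd⟩
          exact ⟨k, ⟨hk, hp⟩, by exact_mod_cast hdvd⟩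
      have hflag : (((List.range n).filter (fun k => decide (Nat.Prime (k + 1)))).map
            (fun k : Nat => ((k : Int) + 1))).foldl
            (fun b p => if PySem.Int.mod ((n : Int) + 1) p == 0 then false else b) true
          = decide (Nat.Prime (n + 1)) := by
        rw [PySem.List.foldl_if_false_eq, Bool.true_and]
        by_cases hp : Nat.Prime (n + 1)
        · have hfalse : ((((List.range n).filter (fun k => decide (Nat.Prime (k + 1)))).map
              (fun k : Nat => ((k : Int) + 1))).any (fun p => PySem.Int.mod ((n : Int) + 1) p == 0)) = false := by
            rcases hcase : (((List.range n).filter (fun k => decide (Nat.Prime (k + 1)))).map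
                (fun k : Nat => ((k : Int) + 1))).any (fun p => PySem.Int.mod ((n : Int) + 1) p == 0) with _ | _
            · rfl
            · exact absurd (hiff.mp hcase) ((prime_iff_no_lt_prime_dvd n h1).mp hp)
          rw [hfalse]; simp [hp]
        · have hex : ∃ k : Nat, k < n ∧ Nat.Prime (k + 1) ∧ (k + 1) ∣ (n + 1) := by
            by_contra hcontra
            exact hp ((prime_iff_no_lt_prime_dvd n h1).mpr hcontra)
          rw [hiff.mpr hex]; simp [hp]
      simp only [hflag]
      by_cases hp : Nat.Prime (n + 1)
      · rw [if_pos (by simp [hp])]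
        rw [List.range_succ, List.filter_append, List.map_append]
        unfold applyMarks
        rw [List.range_succ, List.foldl_append, List.foldl_cons, List.foldl_nil, if_pos hp]
        simp [hp, Int.toNat_natCast]
      · rw [if_neg (by simp [hp])]
        rw [List.range_succ, List.filter_append, List.map_append]
        unfold applyMarks
        rw [List.range_succ, List.foldl_append, List.foldl_cons, List.foldl_nil, if_neg hp]
        simp [hp]

theorem setfold_length (xs : List Int) (c : List Bool) :
    (xs.foldl (fun c m => c.set m.toNat true) c).length = c.length := by
  induction xs generalizing c with
  | nil => rfl
  | cons x xs ih => simp [List.foldl_cons, ih]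

theorem setfold_getD (xs : List Int) (c : List Bool) (j : Nat) :
    (xs.foldl (fun c m => c.set m.toNat true) c).getD j false
      = (c.getD j false || xs.any (fun m => decide (m.toNat = j ∧ j < c.length))) := by
  induction xs generalizing c with
  | nil => simp
  | cons x xs ih =>
    rw [List.foldl_cons, ih (c.set x.toNat true)]
    simp only [List.length_set, List.any_cons]
    have h : (c.set x.toNat true).getD j false
        = (c.getD j false || decide (x.toNat = j ∧ j < c.length)) := by
      simp only [List.getD, List.getElem?_set]
      by_cases h1 : x.toNat = j <;> by_cases h2 : j < c.length <;> simp [h1, h2]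
    rw [h, Bool.or_assoc]

theorem outerfold_getD (ds : List Int) (f : Int → List Int) (c : List Bool) (j : Nat) :
    (ds.foldl (fun c d => (f d).foldl (fun c m => c.set m.toNat true) c) c).getD j false
      = (c.getD j false ||
         ds.any (fun d => (f d).any (fun m => decide (m.toNat = j ∧ j < c.length)))) := by
  induction ds generalizing c with
  | nil => simp
  | cons d ds ih =>
    rw [List.foldl_cons, ih]
    rw [setfold_length, setfold_getD, List.any_cons, Bool.or_assoc]

theorem sieve_true_iff (n j : Nat) (hj : j ≤ n) :
    ((sieveB (n : Int)).getD j false = true) ↔ ∃ d : Nat, 2 ≤ d ∧ 2 * d ≤ j ∧ d ∣ j := by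
  unfold sieveB
  rw [outerfold_getD (f := fun d => PySem.List.pyRange (2 * d) ((n : Int) + 1) d)]
  have hlen : (List.replicate ((n : Int) + 1).toNat false).length = n + 1 := by
    simp
  rw [hlen]
  have hrep : (List.replicate ((n : Int) + 1).toNat false).getD j false = false := by
    simp [List.getD, List.getElem?_replicate]; split <;> rfl
  rw [hrep]
  simp only [Bool.false_or, List.any_eq_true,
    PySem.List.mem_pyRange_one, decide_eq_true_eq]
  constructor
  · rintro ⟨d, ⟨hd2, hdn⟩, m, hm, hmj, _⟩
    have hdpos : (0:Int) < d := by omega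
    rw [PySem.List.mem_pyRange_iff_of_pos hdpos] at hm
    obtain ⟨h1, h2, h3⟩ := hm
    have hmnn : (0:Int) ≤ m := by omega
    have hmj' : m = (j : Int) := by omega
    have hdvd : d ∣ m := by have := dvd_add h3 (dvd_mul_left d 2); simpa using this
    refine ⟨d.toNat, by omega, by omega, ?_⟩
    have : (d.toNat : Int) ∣ (j : Int) := by
      rw [Int.toNat_of_nonneg (by omega : (0:Int) ≤ d)]
      rw [hmj'] at hdvd; exact hdvd
    exact_mod_cast this
  · rintro ⟨d, hd2, hdj, hdvd⟩
    refine ⟨(d : Int), ⟨by omega, by omega⟩, (j : Int), ?_, by omega, by omega⟩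
    rw [PySem.List.mem_pyRange_iff_of_pos (by omega : (0:Int) < (d:Int))]
    refine ⟨by omega, by omega, ?_⟩
    have : (d:Int) ∣ (j:Int) := by exact_mod_cast hdvd
    exact dvd_sub this (dvd_mul_left _ 2)

theorem B_marks (n : Nat) (l : List String) :
    (PySem.List.pyRange 1 (n : Int) 1).foldl
      (fun lst i => if !((sieveB (n : Int)).getD (i + 1).toNat false) then lst.set i.toNat "*" else lst)
      l
    = applyMarks n l := by
  rcases n with _ | m
  · simp [applyMarks]
  · have hrange : ((m + 1 : Nat) : Int) - 1 = (m : Nat) := by push_cast; ring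
    rw [PySem.List.pyRange_one, hrange, Int.toNat_natCast, List.foldl_map]
    have hcong : ∀ k ∈ List.range m, ∀ lst : List String,
        (if !((sieveB ((m + 1 : Nat) : Int)).getD ((1 + (k : Int)) + 1).toNat false)
          then lst.set (1 + (k : Int)).toNat "*" else lst)
        = (if Nat.Prime (k + 2) then lst.set (k + 1) "*" else lst) := by
      intro k hk lst
      have hkm : k < m := List.mem_range.mp hk
      have h1 : ((1 + (k : Int)) + 1).toNat = k + 2 := by omega
      have h2 : (1 + (k : Int)).toNat = k + 1 := by omega
      rw [h1, h2]
      have hb : (sieveB ((m + 1 : Nat) : Int)).getD (k + 2) false = decide (¬ Nat.Prime (k + 2)) := by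
        have hiff := sieve_true_iff (m + 1) (k + 2) (by omega)
        rcases hcase : (sieveB ((m + 1 : Nat) : Int)).getD (k + 2) false with _ | _
        · have hne : ¬ ∃ d : Nat, 2 ≤ d ∧ 2 * d ≤ k + 2 ∧ d ∣ (k + 2) := by
            intro hx
            have hx2 := hiff.mpr hx
            rw [hx2] at hcase
            exact absurd hcase (by decide)
          have hp : Nat.Prime (k + 2) := by
            by_contra hc
            exact hne ((notPrime_iff_small_divisor _ (by omega)).mp hc)
          have hd : decide (¬ Nat.Prime (k + 2)) = false := by simp [hp]
          rw [hd]
        · have hp : ¬ Nat.Prime (k + 2) :=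
            (notPrime_iff_small_divisor _ (by omega)).mpr (hiff.mp hcase)
          have hd : decide (¬ Nat.Prime (k + 2)) = true := by simp [hp]
          rw [hd]
      rw [hb]
      by_cases hp : Nat.Prime (k + 2) <;> simp [hp]
    rw [PySem.List.foldl_congr_mem' _ _ (fun lst k => if Nat.Prime (k + 2) then lst.set (k + 1) "*" else lst) _ hcong]
    unfold applyMarks
    rw [List.range_succ_eq_map, List.foldl_cons, if_neg (by exact Nat.not_prime_one), List.foldl_map]

-- ===== VERDICT (by name: the statement is the Claim_ definition above) =====
theorem convertToPrimeArrangement_spec : Claim_equal_convertToPrimeArrangement := by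
  intro a_list _
  unfold Spec_convertToPrimeArrangement convertToPrimeArrangement convertToPrimeArrangement_alt
  rw [A_loop a_list.length a_list, B_marks a_list.length a_list]
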